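-- pv_equiv track=rewrite | github.com/utlablsgi/Leak-Points-Data-management-System- | Get_HWM_data.py | data_checking
-- ===== SOURCE A (Python) =====
-- def data_checking(header,node):
--     status_list = []
--     for each in node:
--         child_list = []
--         for each_item in header:
--
--             if each in each_item:
--                 if "Pressure" in each_item:
--                     child_list.append("P")
--                 elif "Flow" in each_item:
--                     child_list.append("F")
--         status_list.append(child_list)
--
--     return status_list
-- ===== SOURCE B (Python) =====
-- def data_checking(header, node):
--     # Classify each header once: keep only headers that carry a P/F marker.
--     table = []
--     for h in header:
--         if "Pressure" in h:
--             table.append((h, "P"))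
--         elif "Flow" in h:
--             table.append((h, "F"))
--     return [[m for (h, m) in table if n in h] for n in node]
-- ===== Notes on version B (the rewrite author's own statement) =====
-- stated objective: faster
-- what changed: B classifies every header once into a (header, marker) table in a separate pass, then builds each node's list with a single comprehension over the table, instead of re-testing the Pressure/Flow substrings inside the nested per-node loop.
import Mathlib
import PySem

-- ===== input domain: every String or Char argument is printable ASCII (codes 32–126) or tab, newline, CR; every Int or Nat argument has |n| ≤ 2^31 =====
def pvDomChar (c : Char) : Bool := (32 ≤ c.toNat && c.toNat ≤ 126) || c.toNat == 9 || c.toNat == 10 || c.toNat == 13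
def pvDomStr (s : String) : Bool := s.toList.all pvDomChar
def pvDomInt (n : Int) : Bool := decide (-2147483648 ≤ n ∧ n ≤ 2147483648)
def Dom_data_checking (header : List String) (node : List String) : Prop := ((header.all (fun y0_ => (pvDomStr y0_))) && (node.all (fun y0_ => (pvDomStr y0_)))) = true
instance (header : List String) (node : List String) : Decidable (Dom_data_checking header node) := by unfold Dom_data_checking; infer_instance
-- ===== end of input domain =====

-- B precomputes the Pressure/Flow classification of each header once, instead of re-testing it inside the nested loop; same results.

-- ===== PORT A =====
def data_checking (header : List String) (node : List String) : List (List String) :=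
  node.foldl (fun status_list each =>
    status_list ++ [header.foldl (fun child_list each_item =>
      if PySem.Str.isIn each each_item then
        if PySem.Str.isIn "Pressure" each_item then child_list ++ ["P"]
        else if PySem.Str.isIn "Flow" each_item then child_list ++ ["F"]
        else child_list
      else child_list) []]) []

-- ===== PORT B =====
def dcMarker (h : String) : Option String :=
  if PySem.Str.isIn "Pressure" h then some "P"
  else if PySem.Str.isIn "Flow" h then some "F"
  else none

def data_checking_alt (header : List String) (node : List String) : List (List String) :=
  let table := header.filterMap (fun h => (dcMarker h).map (fun m => (h, m)))
  node.map (fun n => (table.filter (fun p => PySem.Str.isIn n p.1)).map Prod.snd)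

-- ===== PRECONDITION & SPEC =====
def Spec_data_checking (header : List String) (node : List String) (out : List (List String)) : Prop := out = data_checking_alt header node
instance (header : List String) (node : List String) (out : List (List String)) : Decidable (Spec_data_checking header node out) := by unfold Spec_data_checking; infer_instance

-- ===== CLAIM (what is proved, stated in full; the proofs are below) =====
def Claim_equal_data_checking : Prop := ∀ (header : List String) (node : List String), Dom_data_checking header node → Spec_data_checking header node (data_checking header node)

-- ===== LEMMAS AND PROOFS =====
theorem dc_inner (n : String) (hs : List String) (acc : List String) :
    hs.foldl (fun child_list each_item =>
      if PySem.Str.isIn n each_item then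
        if PySem.Str.isIn "Pressure" each_item then child_list ++ ["P"]
        else if PySem.Str.isIn "Flow" each_item then child_list ++ ["F"]
        else child_list
      else child_list) acc
    = acc ++ ((hs.filterMap (fun h => (dcMarker h).map (fun m => (h, m)))).filter
        (fun p => PySem.Str.isIn n p.1)).map Prod.snd := by
  induction hs generalizing acc with
  | nil => simp only [List.foldl_nil, List.filterMap_nil, List.filter_nil, List.map_nil,
      List.append_nil]
  | cons h t ih =>
    simp only [List.foldl_cons, List.filterMap_cons, dcMarker]
    by_cases h2 : PySem.Str.isIn "Pressure" h = true
    · rw [if_pos h2, if_pos h2]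
      simp only [Option.map_some]
      by_cases h1 : PySem.Str.isIn n h = true
      · rw [if_pos h1, ih]
        simp only [List.filter_cons, h1, if_true, List.map_cons, List.append_assoc,
          List.singleton_append]
        rfl
      · rw [if_neg h1, ih]
        simp only [List.filter_cons, h1, if_false, Bool.false_eq_true]
        rfl
    · rw [if_neg h2, if_neg h2]
      by_cases h3 : PySem.Str.isIn "Flow" h = true
      · rw [if_pos h3, if_pos h3]
        simp only [Option.map_some]
        by_cases h1 : PySem.Str.isIn n h = true
        · rw [if_pos h1, ih]
          simp only [List.filter_cons, h1, if_true, List.map_cons, List.append_assoc,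
            List.singleton_append]
          rfl
        · rw [if_neg h1, ih]
          simp only [List.filter_cons, h1, if_false, Bool.false_eq_true]
          rfl
      · rw [if_neg h3, if_neg h3]
        simp only [Option.map_none]
        by_cases h1 : PySem.Str.isIn n h = true
        · rw [if_pos h1, ih]; rfl
        · rw [if_neg h1, ih]; rfl

theorem dc_outer (header : List String) (ns : List String) (acc : List (List String)) :
    ns.foldl (fun status_list each =>
      status_list ++ [header.foldl (fun child_list each_item =>
        if PySem.Str.isIn each each_item then
          if PySem.Str.isIn "Pressure" each_item then child_list ++ ["P"]
          else if PySem.Str.isIn "Flow" each_item then child_list ++ ["F"]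
          else child_list
        else child_list) []]) acc
    = acc ++ ns.map (fun n =>
        (((header.filterMap (fun h => (dcMarker h).map (fun m => (h, m)))).filter
          (fun p => PySem.Str.isIn n p.1)).map Prod.snd)) := by
  induction ns generalizing acc with
  | nil => simp only [List.foldl_nil, List.map_nil, List.append_nil]
  | cons n t ih =>
    simp only [List.foldl_cons, List.map_cons]
    rw [ih, dc_inner]
    simp only [List.nil_append, List.append_assoc, List.singleton_append]

-- ===== VERDICT (by name: the statement is the Claim_ definition above) =====
theorem data_checking_spec : Claim_equal_data_checking := by
  intro header node _
  unfold Spec_data_checking data_checking data_checking_alt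
  rw [dc_outer]
  simp
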